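-- pv_equiv track=rewrite | github.com/bredelings/BAli-Phy | scripts/show-piecewise.py | get_path
-- ===== SOURCE A (Python) =====
-- def get_path(path_string):
--     if not path_string:
--         return []
--
--     path = path_string.split('/')
--     for i in range(0,len(path)):
--         if i < len(path)-1:
--             path[i] = path[i]+'/'
--     return path
-- ===== SOURCE B (Python) =====
-- def get_path(path_string):
--     if not path_string:
--         return []
--     result = []
--     current = ''
--     for ch in path_string:
--         current += ch
--         if ch == '/':
--             result.append(current)
--             current = ''
--     result.append(current)
--     return result
-- ===== Notes on version B (the rewrite author's own statement) =====
-- stated objective: alternative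
-- what changed: Replaces split('/') followed by an index loop that re-suffixes every segment with a single left-to-right character scan that accumulates each segment (slash included) as it goes.
import Mathlib
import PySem

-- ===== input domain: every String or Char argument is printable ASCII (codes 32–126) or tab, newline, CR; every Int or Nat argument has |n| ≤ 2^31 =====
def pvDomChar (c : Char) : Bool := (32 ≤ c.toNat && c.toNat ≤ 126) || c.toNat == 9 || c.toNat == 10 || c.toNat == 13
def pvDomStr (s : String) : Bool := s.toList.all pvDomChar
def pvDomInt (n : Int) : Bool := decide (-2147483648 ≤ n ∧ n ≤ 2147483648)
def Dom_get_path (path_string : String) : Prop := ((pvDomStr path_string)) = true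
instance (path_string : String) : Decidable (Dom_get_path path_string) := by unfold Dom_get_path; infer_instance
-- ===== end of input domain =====

-- B replaces A's split('/') + index loop (which re-suffixes every non-final segment)
-- by a single character scan accumulating each segment with its trailing slash: an
-- alternative decomposition of the same O(n) task.


-- ===== PORT A =====
-- A: split on '/', then a for-loop over range(0, len(path)) appending '/' to every
-- entry except the last (list assignment = List.set; strings kept as List Char and
-- turned into String at return).
def get_path (path_string : String) : List String :=
  if path_string == "" then []
  else
    let path := PySem.Chars.splitOn path_string.toList ['/']
    let path := (PySem.List.pyRange 0 (path.length : Int) 1).foldl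
      (fun p i =>
        if i < (p.length : Int) - 1 then p.set i.toNat (p.getD i.toNat [] ++ ['/'])
        else p) path
    path.map String.mk

-- ===== PORT B =====
-- B: one pass over the characters with a (result, current) accumulator; '/' closes
-- the current segment (slash included), the final segment is appended after the loop.
def get_path_alt (path_string : String) : List String :=
  if path_string == "" then []
  else
    let r := path_string.toList.foldl
      (fun (st : List String × List Char) c =>
        let cur := st.2 ++ [c]
        if c == '/' then (st.1 ++ [String.mk cur], []) else (st.1, cur))
      ([], [])
    r.1 ++ [String.mk r.2]

-- ===== PRECONDITION & SPEC =====
def Spec_get_path (path_string : String) (out : List String) : Prop := out = get_path_alt path_string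
instance (path_string : String) (out : List String) : Decidable (Spec_get_path path_string out) := by unfold Spec_get_path; infer_instance

-- ===== CLAIM (what is proved, stated in full; the proofs are below) =====
def Claim_equal_get_path : Prop := ∀ (path_string : String), Dom_get_path path_string → Spec_get_path path_string (get_path path_string)

-- ===== LEMMAS AND PROOFS =====

-- simple recursive characterisation of str.split('/')
def pvSplit : List Char → List (List Char)
  | [] => [[]]
  | c :: rest => if c = '/' then [] :: pvSplit rest else (pvSplit rest).modifyHead (c :: ·)

-- suffix-all-but-last (A's loop) fused with the final String.mk, recursively
def pvTag : List (List Char) → List String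
  | [] => []
  | [x] => [String.mk x]
  | x :: rest => String.mk (x ++ ['/']) :: pvTag rest

lemma pvSplit_ne_nil (l : List Char) : pvSplit l ≠ [] := by
  cases l with
  | nil => simp [pvSplit]
  | cons c rest =>
    simp only [pvSplit]
    split
    · simp
    · cases h : pvSplit rest with
      | nil => exact absurd h (pvSplit_ne_nil rest)
      | cons a t => simp

lemma splitOn_go_eq (l : List Char) : ∀ (fuel : Nat) (cur : List Char) (acc : List (List Char)),
    l.length ≤ fuel →
    PySem.Chars.splitOn.go ['/'] fuel l cur acc
      = acc.reverse ++ (pvSplit l).modifyHead (cur.reverse ++ ·) := by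
  induction l with
  | nil =>
    intro fuel cur acc _
    cases fuel <;> simp [PySem.Chars.splitOn.go, pvSplit]
  | cons c rest ih =>
    intro fuel cur acc hf
    cases fuel with
    | zero => simp at hf
    | succ f =>
      rw [PySem.Chars.splitOn.go]
      by_cases hc : c = '/'
      · subst hc
        simp only [List.isPrefixOf, beq_self_eq_true, Bool.true_and, if_pos,
          List.length_cons, List.length_nil, List.drop_succ_cons, List.drop_zero]
        rw [ih f [] (cur.reverse :: acc) (by simpa using Nat.le_of_succ_le_succ hf)]
        simp [pvSplit]
        cases h : pvSplit rest with
        | nil => exact absurd h (pvSplit_ne_nil rest)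
        | cons a t => simp
      · have : (['/'].isPrefixOf (c :: rest)) = false := by
          simp [List.isPrefixOf]
          exact fun h => hc h.symm
        rw [this]
        simp only [Bool.false_eq_true, if_false]
        rw [ih f (c :: cur) acc (Nat.le_of_succ_le_succ hf)]
        simp only [pvSplit, if_neg hc]
        cases h : pvSplit rest with
        | nil => exact absurd h (pvSplit_ne_nil rest)
        | cons a t => simp

lemma splitOn_eq (l : List Char) :
    PySem.Chars.splitOn l ['/'] = pvSplit l := by
  unfold PySem.Chars.splitOn
  rw [splitOn_go_eq l (l.length + 1) [] [] (Nat.le_succ _)]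
  cases h : pvSplit l with
  | nil => exact absurd h (pvSplit_ne_nil l)
  | cons a t => simp

-- A's index loop: processing indices from pre.length upward turns pre ++ suf into
-- pre ++ (suf with '/' appended to all but the overall last); stated with String.mk fused.
lemma loop_eq (suf : List (List Char)) : ∀ (pre : List (List Char)), suf ≠ [] →
    ((PySem.List.pyRange (pre.length : Int) ((pre.length + suf.length : Nat) : Int) 1).foldl
      (fun p i =>
        if i < (p.length : Int) - 1 then p.set i.toNat (p.getD i.toNat [] ++ ['/'])
        else p) (pre ++ suf)).map String.mk
      = pre.map String.mk ++ pvTag suf := by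
  induction suf with
  | nil => intro pre h; exact absurd rfl h
  | cons x rest ih =>
    intro pre _
    have hcons : PySem.List.pyRange (pre.length : Int) ((pre.length + (x :: rest).length : Nat) : Int) 1
        = (pre.length : Int) :: PySem.List.pyRange ((pre.length : Int) + 1) ((pre.length + (x :: rest).length : Nat) : Int) 1 := by
      apply PySem.List.pyRange_one_cons
      push_cast; simp
    rw [hcons]
    simp only [List.foldl_cons]
    have hget : (pre ++ x :: rest).getD ((pre.length : Int)).toNat [] = x := by
      simp [List.getD_eq_getElem?_getD]
    cases rest with
    | nil =>
      have hcond : ¬ ((pre.length : Int) < ((pre ++ [x]).length : Int) - 1) := by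
        simp
      rw [if_neg hcond]
      have : PySem.List.pyRange ((pre.length : Int) + 1) ((pre.length + ([x] : List (List Char)).length : Nat) : Int) 1 = [] := by
        apply PySem.List.pyRange_one_eq_nil
        push_cast; simp
      rw [this]
      simp [pvTag]
    | cons y t =>
      have hcond : ((pre.length : Int) < ((pre ++ x :: y :: t).length : Int) - 1) := by
        simp; push_cast; omega
      rw [if_pos hcond, hget]
      have hset : (pre ++ x :: y :: t).set ((pre.length : Int)).toNat (x ++ ['/'])
          = (pre ++ [x ++ ['/']]) ++ y :: t := by
        simp [List.set_append]
      rw [hset]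
      have hlen : ((pre ++ [x ++ ['/']]).length : Int) = (pre.length : Int) + 1 := by simp
      have hlen2 : ((pre ++ [x ++ ['/']]).length + (y :: t).length : Nat)
          = (pre.length + (x :: y :: t).length : Nat) := by simp; omega
      have := ih (pre ++ [x ++ ['/']]) (by simp)
      rw [hlen, hlen2] at this
      rw [this]
      simp [pvTag]

-- B's scan computes acc ++ pvTag of pvSplit (with cur prepended to the first piece)
lemma scan_eq (l : List Char) : ∀ (acc : List String) (cur : List Char),
    (let r := l.foldl
        (fun (st : List String × List Char) c =>
          let cur := st.2 ++ [c]
          if c == '/' then (st.1 ++ [String.mk cur], []) else (st.1, cur))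
        (acc, cur)
     ; r.1 ++ [String.mk r.2])
      = acc ++ pvTag ((pvSplit l).modifyHead (cur ++ ·)) := by
  induction l with
  | nil => intro acc cur; simp [pvSplit, pvTag]
  | cons c rest ih =>
    intro acc cur
    simp only [List.foldl_cons]
    by_cases hc : c = '/'
    · subst hc
      simp only [beq_self_eq_true, if_pos]
      rw [ih (acc ++ [String.mk (cur ++ ['/'])]) []]
      simp only [pvSplit, if_pos rfl, List.modifyHead_cons]
      cases h : pvSplit rest with
      | nil => exact absurd h (pvSplit_ne_nil rest)
      | cons a t => simp [pvTag]
    · rw [if_neg (by simpa using hc)]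
      rw [ih acc (cur ++ [c])]
      simp only [pvSplit, if_neg hc]
      cases h : pvSplit rest with
      | nil => exact absurd h (pvSplit_ne_nil rest)
      | cons a t => simp [pvTag]

-- ===== VERDICT (by name: the statement is the Claim_ definition above) =====
theorem get_path_spec : Claim_equal_get_path := by
  intro s _
  unfold Spec_get_path get_path get_path_alt
  by_cases hs : s == ""
  · rw [if_pos hs, if_pos hs]
  · rw [if_neg hs, if_neg hs]
    rw [splitOn_eq]
    have hA := loop_eq (pvSplit s.toList) [] (pvSplit_ne_nil _)
    simp only [List.length_nil, List.nil_append, Nat.cast_zero, Nat.zero_add, List.map_nil] at hA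
    have hB := scan_eq s.toList [] []
    simp only [List.nil_append] at hB
    rw [hB]
    cases h : pvSplit s.toList with
    | nil => exact absurd h (pvSplit_ne_nil _)
    | cons a t =>
      rw [h] at hA
      simpa using hA
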